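-- pv_equiv track=rewrite | github.com/tesera/learn-cli | Rwd/Python/MultipleInstance/Rwd/Python/Admin/BASE.py | getHeaderMinusKeyNames
-- ===== SOURCE A (Python) =====
-- def getHeaderMinusKeyNames(ssHeader, ssTabKeynames):
--     '''
--     This subroutine gets a list of variables names
--     that are in the header but not in ssTabKeynames
--     '''
--     newList = []
--     for item in ssHeader:
--         newList.append(item)
--     for varName in ssTabKeynames:
--         location = newList.index(varName)
--         del newList[location]
--     return newList
-- ===== SOURCE B (Python) =====
-- def getHeaderMinusKeyNames(ssHeader, ssTabKeynames):
--     '''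
--     This subroutine gets a list of variables names
--     that are in the header but not in ssTabKeynames
--     '''
--     counts = {}
--     for k in ssTabKeynames:
--         counts[k] = counts.get(k, 0) + 1
--     result = []
--     for item in ssHeader:
--         if counts.get(item, 0) > 0:
--             counts[item] = counts[item] - 1
--         else:
--             result.append(item)
--     if any(c > 0 for c in counts.values()):
--         raise ValueError("keyname not found in header")
--     return result
-- ===== Notes on version B (the rewrite author's own statement) =====
-- stated objective: faster
-- what changed: B builds a count map of the keynames once and makes a single keep-or-drop pass over the header, instead of A's repeated list.index scan plus in-place deletion per keyname.
import Mathlib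
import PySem

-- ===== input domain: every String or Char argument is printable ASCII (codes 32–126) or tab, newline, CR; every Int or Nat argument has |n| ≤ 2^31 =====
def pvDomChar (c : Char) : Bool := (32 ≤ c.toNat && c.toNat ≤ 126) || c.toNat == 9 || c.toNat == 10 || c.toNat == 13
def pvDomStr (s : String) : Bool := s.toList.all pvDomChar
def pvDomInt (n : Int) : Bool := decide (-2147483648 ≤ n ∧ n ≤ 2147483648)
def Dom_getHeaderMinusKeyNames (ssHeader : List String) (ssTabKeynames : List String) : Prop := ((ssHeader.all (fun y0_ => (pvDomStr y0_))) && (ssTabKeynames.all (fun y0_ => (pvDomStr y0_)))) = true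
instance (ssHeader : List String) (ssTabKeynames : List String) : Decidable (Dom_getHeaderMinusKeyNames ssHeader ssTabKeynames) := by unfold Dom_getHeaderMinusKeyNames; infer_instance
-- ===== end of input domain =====

-- B replaces A's per-keyname list.index scan + in-place delete by a keyname count map and one keep-or-drop pass over the header (faster: O(n+m) vs O(n*m)).

-- ===== PORT A =====
-- one step of A's second loop: newList.index(varName) (ValueError when absent → none) then del newList[location]
def pvEraseStep (acc : Option (List String)) (varName : String) : Option (List String) :=
  match acc with
  | none => none
  | some l =>
    match PySem.List.index? l varName with
    | none => none                    -- list.index raises ValueError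
    | some location => some (l.eraseIdx location)

def getHeaderMinusKeyNames (ssHeader : List String) (ssTabKeynames : List String) : List String :=
  let newList := ssHeader.foldl (fun acc item => acc ++ [item]) []
  (ssTabKeynames.foldl pvEraseStep (some newList)).getD []   -- none encodes the ValueError path, excluded by Pre_

-- ===== PORT B =====
-- one step of B's header pass over state (counts dict, result list)
def pvPassStep (st : PySem.Dict String Int × List String) (item : String) : PySem.Dict String Int × List String :=
  if st.1.getD item 0 > 0 then (st.1.insert item (st.1.getD item 0 - 1), st.2)
  else (st.1, st.2 ++ [item])

def getHeaderMinusKeyNames_alt (ssHeader : List String) (ssTabKeynames : List String) : List String :=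
  let counts := ssTabKeynames.foldl (fun d k => d.insert k (d.getD k 0 + 1)) (PySem.Dict.empty)
  let st := ssHeader.foldl pvPassStep (counts, [])
  -- Source B here raises ValueError when a positive count remains; that raise yields no value and those inputs are outside Pre_
  st.2

-- ===== PRECONDITION & SPEC =====
-- Pre_ excludes exactly the inputs where some keyname occurs more often in ssTabKeynames than in ssHeader: there A's list.index (and B) raise ValueError.
def Pre_getHeaderMinusKeyNames (ssHeader : List String) (ssTabKeynames : List String) : Prop :=
  ∀ v ∈ ssTabKeynames, ssTabKeynames.count v ≤ ssHeader.count v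
instance (ssHeader : List String) (ssTabKeynames : List String) : Decidable (Pre_getHeaderMinusKeyNames ssHeader ssTabKeynames) := by unfold Pre_getHeaderMinusKeyNames; infer_instance

def pvWitness_getHeaderMinusKeyNames : List String × List String := (["a", "b", "c", "b"], ["b", "a"])

def Spec_getHeaderMinusKeyNames (ssHeader : List String) (ssTabKeynames : List String) (out : List String) : Prop := out = getHeaderMinusKeyNames_alt ssHeader ssTabKeynames
instance (ssHeader : List String) (ssTabKeynames : List String) (out : List String) : Decidable (Spec_getHeaderMinusKeyNames ssHeader ssTabKeynames out) := by unfold Spec_getHeaderMinusKeyNames; infer_instance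

-- ===== CLAIM (what is proved, stated in full; the proofs are below) =====
def Claim_equal_getHeaderMinusKeyNames : Prop := ∀ (ssHeader : List String) (ssTabKeynames : List String), Dom_getHeaderMinusKeyNames ssHeader ssTabKeynames → Pre_getHeaderMinusKeyNames ssHeader ssTabKeynames → Spec_getHeaderMinusKeyNames ssHeader ssTabKeynames (getHeaderMinusKeyNames ssHeader ssTabKeynames)

-- ===== LEMMAS AND PROOFS =====

-- A's first loop is a copy
theorem foldl_append_singleton (l acc : List String) :
    l.foldl (fun a i => a ++ [i]) acc = acc ++ l := by
  induction l generalizing acc with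
  | nil => simp
  | cons x xs ih => simp [ih]

-- common specification: drop, left to right, the first (c x) occurrences of each x
def pvRemove (l : List String) (c : String → Nat) : List String :=
  match l with
  | [] => []
  | x :: xs => if 0 < c x then pvRemove xs (fun v => if v = x then c v - 1 else c v) else x :: pvRemove xs c

theorem pvRemove_congr (l : List String) (c c' : String → Nat) (h : ∀ v ∈ l, c v = c' v) :
    pvRemove l c = pvRemove l c' := by
  induction l generalizing c c' with
  | nil => rfl
  | cons x xs ih =>
    simp only [pvRemove, h x (by simp)]
    split_ifs with hx
    · refine ih _ _ (fun v hv => ?_)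
      by_cases hvx : v = x
      · simp [hvx, h x (by simp)]
      · simp [hvx, h v (by simp [hv])]
    · exact congrArg _ (ih _ _ (fun v hv => h v (by simp [hv])))

theorem pvRemove_zero (l : List String) : pvRemove l (fun _ => 0) = l := by
  induction l with
  | nil => rfl
  | cons x xs ih => simpa [pvRemove] using ih

theorem pvRemove_erase (l : List String) (c : String → Nat) (k : String) (hk : 0 < c k) :
    pvRemove l c = pvRemove (l.erase k) (fun v => if v = k then c v - 1 else c v) := by
  induction l generalizing c with
  | nil => rfl
  | cons x xs ih =>
    by_cases hxk : x = k
    · subst hxk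
      simp [pvRemove, List.erase_cons_head, hk]
    · rw [List.erase_cons_tail (by simp [hxk])]
      simp only [pvRemove]
      have hcx : (if x = k then c x - 1 else c x) = c x := by simp [hxk]
      rw [hcx]
      split_ifs with hx
      · rw [ih (fun v => if v = x then c v - 1 else c v) (by simp [Ne.symm hxk]; exact hk)]
        apply pvRemove_congr
        intro v _
        by_cases h1 : v = x
        · subst h1; simp [hxk]
        · have hkx : ¬ k = x := fun h => hxk h.symm
          by_cases h2 : v = k <;> simp [h1, h2, hkx]
      · rw [ih c hk]

-- A's removal loop computes pvRemove with the keyname multiplicities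
theorem index_eraseIdx_eq_erase (l : List String) (k : String) (hk : k ∈ l) :
    ∃ i, PySem.List.index? l k = some i ∧ l.eraseIdx i = l.erase k := by
  induction l with
  | nil => simp at hk
  | cons x xs ih =>
    by_cases hxk : x = k
    · subst hxk
      exact ⟨0, PySem.List.index?_cons_self x xs, by simp [List.erase_cons_head]⟩
    · have hkxs : k ∈ xs := by simpa [Ne.symm hxk] using hk
      obtain ⟨i, hi, he⟩ := ih hkxs
      refine ⟨i + 1, ?_, ?_⟩
      · rw [PySem.List.index?_cons_of_ne xs hxk, hi]; rfl
      · rw [List.erase_cons_tail (by simp [hxk]), List.eraseIdx_cons_succ, he]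

theorem foldA_eq_pvRemove (ks l : List String) (h : ∀ v ∈ ks, ks.count v ≤ l.count v) :
    ks.foldl pvEraseStep (some l) = some (pvRemove l (fun v => ks.count v)) := by
  induction ks generalizing l with
  | nil => simp [pvRemove_zero]
  | cons k ks' ih =>
    have hkl : k ∈ l := by
      have := h k (by simp)
      have : 0 < l.count k := by simp [List.count_cons] at this; omega
      exact List.count_pos_iff.mp this
    obtain ⟨i, hi, he⟩ := index_eraseIdx_eq_erase l k hkl
    have hstep : pvEraseStep (some l) k = some (l.eraseIdx i) := by
      simp only [pvEraseStep, hi]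
    have h' : ∀ v ∈ ks', ks'.count v ≤ (l.erase k).count v := by
      intro v hv
      have hc := h v (by simp [hv])
      rw [List.count_erase]
      by_cases hvk : v = k
      · subst hvk; simp [List.count_cons] at hc ⊢; omega
      · have hne : (k == v) = false := beq_eq_false_iff_ne.mpr (fun h => hvk h.symm)
        simp [List.count_cons, hne] at hc ⊢
        omega
    rw [List.foldl_cons, hstep, he, ih _ h']
    congr 1
    rw [pvRemove_erase l (fun v => (k :: ks').count v) k (by simp [List.count_cons])]
    apply pvRemove_congr
    intro v _
    by_cases hvk : v = k
    · simp [List.count_cons, hvk]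
    · have hne : ¬ k = v := fun h => hvk h.symm
      simp [List.count_cons, hvk, hne]

-- B's pass computes pvRemove from any dict representing a count function
theorem foldB_eq_pvRemove (l : List String) (d : PySem.Dict String Int) (acc : List String)
    (f : String → Nat) (hd : ∀ v, d.getD v 0 = (f v : Int)) :
    (l.foldl pvPassStep (d, acc)).2 = acc ++ pvRemove l f := by
  induction l generalizing d acc f with
  | nil => simp [pvRemove]
  | cons x xs ih =>
    simp only [List.foldl_cons, pvPassStep, hd x, pvRemove]
    by_cases hx : 0 < f x
    · have hgt : ((f x : Int) > 0) := by exact_mod_cast hx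
      rw [if_pos hgt, if_pos hx]
      exact ih _ _ (fun v => if v = x then f v - 1 else f v)
        (fun v => by
          rw [PySem.Dict.getD_insert]
          by_cases hvx : v = x <;> simp [hvx, hd v] <;> omega)
    · have hng : ¬ ((f x : Int) > 0) := by
        simp only [not_lt] at hx ⊢; exact_mod_cast hx
      rw [if_neg hng, if_neg hx, ih _ _ f hd]
      simp

theorem alt_eq_pvRemove (ssHeader ssTabKeynames : List String) :
    getHeaderMinusKeyNames_alt ssHeader ssTabKeynames
      = pvRemove ssHeader (fun v => ssTabKeynames.count v) := by
  unfold getHeaderMinusKeyNames_alt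
  rw [PySem.Dict.foldl_insert_getD_add_one_eq_counter]
  simpa using foldB_eq_pvRemove ssHeader (PySem.Dict.counter ssTabKeynames) []
    (fun v => ssTabKeynames.count v) (fun v => by simpa using PySem.Dict.getD_counter ssTabKeynames v)

-- ===== VERDICT (by name: the statement is the Claim_ definition above) =====
theorem getHeaderMinusKeyNames_spec : Claim_equal_getHeaderMinusKeyNames := by
  intro ssHeader ssTabKeynames _ hpre
  unfold Spec_getHeaderMinusKeyNames
  rw [alt_eq_pvRemove]
  simp only [getHeaderMinusKeyNames, foldl_append_singleton ssHeader [], List.nil_append]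
  rw [foldA_eq_pvRemove _ _ hpre]
  rfl
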